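-- pv_equiv track=rewrite | github.com/rinothehero/USFL-fork | sfl_sim/batch_scheduler.py | create_schedule
-- ===== SOURCE A (Python) =====
-- import math
-- from typing import Dict, List, Tuple
--
-- def create_schedule(
--     target_batch_size: int,
--     client_data_sizes: Dict[int, int],
-- ) -> Tuple[int, List[Dict[int, int]]]:
--     """
--     Compute optimal iteration count and per-client per-iteration batch sizes.
--
--     Phase 1: Find k that minimizes |sum(ceil(C_i/k)) - B|
--     Phase 2: Distribute batches proportionally per iteration
--
--     Args:
--         target_batch_size: B (desired total batch size per iteration)
--         client_data_sizes: {client_id: data_count}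
--
--     Returns:
--         (k, schedule) where:
--         - k: number of iterations
--         - schedule[iteration][client_id] = batch_size
--     """
--     client_ids = sorted(client_data_sizes.keys())
--     C = [client_data_sizes[cid] for cid in client_ids]
--
--     if not C or all(c == 0 for c in C):
--         return 0, []
--
--     max_c = max(C)
--
--     # Phase 1: Find best k
--     best_k = 1
--     best_diff = float("inf")
--
--     for k in range(1, max_c + 1):
--         total = sum(math.ceil(c / k) for c in C)
--         diff = abs(total - target_batch_size)
--         if diff < best_diff:
--             best_diff = diff
--             best_k = k
--
--     # Phase 2: Compute per-client per-iteration batch sizes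
--     schedule = []
--     for it in range(best_k):
--         batch_sizes = {}
--         for i, cid in enumerate(client_ids):
--             c = C[i]
--             per_iter = math.ceil(c / best_k)
--             used = it * per_iter
--             remaining = c - used
--             batch_sizes[cid] = max(0, min(per_iter, remaining))
--         schedule.append(batch_sizes)
--
--     return best_k, schedule
-- ===== SOURCE B (Python) =====
-- def create_schedule(target_batch_size, client_data_sizes):
--     client_ids = sorted(client_data_sizes)
--     C = [client_data_sizes[cid] for cid in client_ids]
--     if not C or all(c == 0 for c in C):
--         return 0, []
--     max_c = max(C)
--     # smallest k minimizing |total(k) - B|: min over the candidate range picks the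
--     # first argmin; integer ceiling division -(-c // k) replaces float math.ceil
--     best_k = min(range(1, max(max_c, 1) + 1),
--                  key=lambda k: abs(sum(-(-c // k) for c in C) - target_batch_size))
--     per = [-(-c // best_k) for c in C]
--     remaining = list(C)
--     schedule = []
--     for _ in range(best_k):
--         row = {}
--         new_remaining = []
--         for cid, p, r in zip(client_ids, per, remaining):
--             b = max(0, min(p, r))
--             row[cid] = b
--             new_remaining.append(r - b)
--         schedule.append(row)
--         remaining = new_remaining
--     return best_k, schedule
-- ===== Notes on version B (the rewrite author's own statement) =====
-- stated objective: alternative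
-- what changed: Phase 1 picks k via min() with an absolute-difference key over the candidate range using integer ceiling division -(-c//k), replacing A's running best_diff scan seeded with float('inf') and math.ceil; phase 2 builds each iteration's row by clamping and subtracting from a maintained per-client remaining vector instead of recomputing used = it*per_iter in closed form per cell.
import Mathlib
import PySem

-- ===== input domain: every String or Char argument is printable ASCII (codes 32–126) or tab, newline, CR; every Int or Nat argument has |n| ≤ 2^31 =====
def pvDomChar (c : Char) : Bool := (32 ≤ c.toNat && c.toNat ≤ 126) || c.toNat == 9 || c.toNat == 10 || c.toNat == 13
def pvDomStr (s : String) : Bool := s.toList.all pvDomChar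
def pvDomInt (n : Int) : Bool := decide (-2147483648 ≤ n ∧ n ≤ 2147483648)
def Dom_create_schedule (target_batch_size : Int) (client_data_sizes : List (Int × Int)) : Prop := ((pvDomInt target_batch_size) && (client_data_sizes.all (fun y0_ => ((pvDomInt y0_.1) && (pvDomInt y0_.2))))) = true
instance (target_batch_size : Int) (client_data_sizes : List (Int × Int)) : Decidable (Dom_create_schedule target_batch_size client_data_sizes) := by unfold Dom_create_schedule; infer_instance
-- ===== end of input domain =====

-- B replaces A's running best_diff scan (float inf sentinel, math.ceil) by min-with-key over the
-- candidate range with integer ceiling division, and builds the schedule by subtracting from a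
-- maintained per-client remaining vector instead of recomputing used = it*per_iter per cell
-- (objective: alternative structure, same cost).

-- ===== PORT A =====
-- math.ceil(c / k): exact as integer ceiling division on Dom (|c| ≤ 2^31 < 2^53)
def pvCeilDiv (c k : Int) : Int := -(PySem.Int.floordiv (-c) k)

def pvStepA (tb : Int) (C : List Int) (st : Option Int × Int) (k : Int) : Option Int × Int :=
  let total := (C.map (fun c => pvCeilDiv c k)).sum
  let diff := |total - tb|
  match st.1 with
  | none => (some diff, k)                 -- best_diff = float('inf'): diff < inf always
  | some bd => if diff < bd then (some diff, k) else st

def pvRowA (ids C : List Int) (bk it : Int) : PySem.Dict Int Int :=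
  (PySem.List.enumerate ids).foldl
    (fun bs icid =>
      let c := PySem.List.pyGetD C icid.1 0      -- index always in range: len(C) = len(ids)
      let per_iter := pvCeilDiv c bk
      let used := it * per_iter
      let remaining := c - used
      bs.insert icid.2 (max 0 (min per_iter remaining)))
    PySem.Dict.empty

def create_schedule (target_batch_size : Int) (client_data_sizes : List (Int × Int)) : Int × (List (List (Int × Int))) :=
  let d : PySem.Dict Int Int := PySem.Dict.mk client_data_sizes
  let client_ids := PySem.List.sorted d.keys (fun x => x) false
  let C := client_ids.map (fun cid => d.getD cid 0)   -- cid ∈ keys: the lookup always hits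
  if C = [] ∨ C.all (fun c => c == 0) then (0, [])
  else
    let max_c := (PySem.List.max? C (fun x => x)).getD 0   -- C ≠ []: max? = some
    let best := (PySem.List.pyRange 1 (max_c + 1) 1).foldl (pvStepA target_batch_size C) (none, 1)
    let best_k := best.2
    let schedule := (PySem.List.pyRange 0 best_k 1).foldl
      (fun acc it => acc ++ [(pvRowA client_ids C best_k it).items]) []
    (best_k, schedule)

-- ===== PORT B =====
def pvKeyB (tb : Int) (C : List Int) (k : Int) : Int :=
  |(C.map (fun c => -(PySem.Int.floordiv (-c) k))).sum - tb|

def pvInnerB (rr : PySem.Dict Int Int × List Int) (cpr : Int × Int × Int) :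
    PySem.Dict Int Int × List Int :=
  let b := max 0 (min cpr.2.1 cpr.2.2)
  (rr.1.insert cpr.1 b, rr.2 ++ [cpr.2.2 - b])

def create_schedule_alt (target_batch_size : Int) (client_data_sizes : List (Int × Int)) : Int × (List (List (Int × Int))) :=
  let d : PySem.Dict Int Int := PySem.Dict.mk client_data_sizes
  let client_ids := PySem.List.sorted d.keys (fun x => x) false
  let C := client_ids.map (fun cid => d.getD cid 0)
  if C = [] ∨ C.all (fun c => c == 0) then (0, [])
  else
    let max_c := (PySem.List.max? C (fun x => x)).getD 0
    -- range(1, max(max_c,1)+1) is nonempty, so min? is always some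
    let best_k := (PySem.List.min? (PySem.List.pyRange 1 (max max_c 1 + 1) 1)
        (pvKeyB target_batch_size C)).getD 1
    let per := C.map (fun c => -(PySem.Int.floordiv (-c) best_k))
    let st := (PySem.List.pyRange 0 best_k 1).foldl
      (fun (st : List (List (Int × Int)) × List Int) _ =>
        let rowrem := (client_ids.zip (per.zip st.2)).foldl pvInnerB (PySem.Dict.empty, [])
        (st.1 ++ [rowrem.1.items], rowrem.2))
      ([], C)
    (best_k, st.1)

-- ===== PRECONDITION & SPEC =====
def Spec_create_schedule (target_batch_size : Int) (client_data_sizes : List (Int × Int)) (out : Int × (List (List (Int × Int)))) : Prop := out = create_schedule_alt target_batch_size client_data_sizes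
instance (target_batch_size : Int) (client_data_sizes : List (Int × Int)) (out : Int × (List (List (Int × Int)))) : Decidable (Spec_create_schedule target_batch_size client_data_sizes out) := by unfold Spec_create_schedule; infer_instance

-- ===== CLAIM (what is proved, stated in full; the proofs are below) =====
def Claim_equal_create_schedule : Prop := ∀ (target_batch_size : Int) (client_data_sizes : List (Int × Int)), Dom_create_schedule target_batch_size client_data_sizes → Spec_create_schedule target_batch_size client_data_sizes (create_schedule target_batch_size client_data_sizes)

-- ===== LEMMAS AND PROOFS =====

-- remaining data of a client of size c after t iterations with per-iteration batch pvCeilDiv c k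
def pvRemF (k t c : Int) : Int := if 0 < c then max 0 (c - t * pvCeilDiv c k) else c

lemma pvRemF_zero (k c : Int) : pvRemF k 0 c = c := by
  unfold pvRemF; split_ifs with hc <;> omega

lemma pvEntry_step (k c t : Int) (hk : 1 ≤ k) :
    max 0 (min (pvCeilDiv c k) (pvRemF k t c)) = max 0 (min (pvCeilDiv c k) (c - t * pvCeilDiv c k)) ∧
    pvRemF k t c - max 0 (min (pvCeilDiv c k) (pvRemF k t c)) = pvRemF k (t + 1) c := by
  obtain ⟨h1, h2⟩ := (PySem.Int.neg_floordiv_neg_eq_iff_of_pos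
    (a := c) (b := k) (q := pvCeilDiv c k) (by omega)).1 rfl
  set p := pvCeilDiv c k with hp
  have hpos : 0 < c → 1 ≤ p := by
    intro hc; by_contra hcon
    have hp0 : p ≤ 0 := by omega
    have hh : p * k ≤ 0 * k := mul_le_mul_of_nonneg_right hp0 (by omega)
    rw [zero_mul] at hh; linarith
  have hneg : c ≤ 0 → p ≤ 0 := by
    intro hc; by_contra hcon
    have hh : 0 * k ≤ (p - 1) * k := mul_le_mul_of_nonneg_right (by omega) (by omega)
    rw [zero_mul] at hh; linarith
  unfold pvRemF
  rw [← hp]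
  have hT : c - (t + 1) * p = c - t * p - p := by ring
  split_ifs with hc
  · have h1p := hpos hc
    rw [hT]
    generalize c - t * p = w
    constructor <;> omega
  · have h0p := hneg (by omega)
    generalize t * p = u
    constructor <;> omega

-- Python min's fold step (first argmin under f)
def pvMStep (f : Int → Int) (acc : Option Int) (x : Int) : Option Int :=
  match acc with
  | none => some x
  | some m => if f x < f m then some x else some m

lemma pvMin?_eq (f : Int → Int) (l : List Int) :
    PySem.List.min? l f = l.foldl (pvMStep f) none := by
  unfold PySem.List.min?
  congr 1
  funext acc x
  cases acc <;> rfl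

-- A's strict-< running minimum over l, seeded with (f b, b), equals Python min (first argmin)
lemma pvMinAux (f : Int → Int) : ∀ (l : List Int) (b m : Int),
    l.foldl (pvMStep f) (some b) = some m →
    l.foldl (fun (st : Option Int × Int) k =>
      match st.1 with
      | none => (some (f k), k)
      | some bd => if f k < bd then (some (f k), k) else st) (some (f b), b) = (some (f m), m)
  | [], b, m, h => by
    simp only [List.foldl_nil, Option.some.injEq] at h
    subst h; rfl
  | k :: t, b, m, h => by
    simp only [List.foldl_cons] at h ⊢
    rw [show pvMStep f (some b) k = if f k < f b then some k else some b from rfl] at h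
    by_cases hc : f k < f b
    · simp only [hc, if_pos] at h ⊢
      exact pvMinAux f t k m h
    · simp only [hc, if_neg, not_false_iff] at h ⊢
      exact pvMinAux f t b m h

lemma pvStepA_eq (tb : Int) (C : List Int) :
    pvStepA tb C = (fun (st : Option Int × Int) k =>
      match st.1 with
      | none => (some (pvKeyB tb C k), k)
      | some bd => if pvKeyB tb C k < bd then (some (pvKeyB tb C k), k) else st) := rfl

lemma pvBest_eq (tb : Int) (C : List Int) (maxc : Int) :
    ((PySem.List.pyRange 1 (maxc + 1) 1).foldl (pvStepA tb C) (none, 1)).2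
      = (PySem.List.min? (PySem.List.pyRange 1 (max maxc 1 + 1) 1) (pvKeyB tb C)).getD 1 := by
  by_cases h : 1 ≤ maxc
  · have hmax : max maxc 1 = maxc := by omega
    rw [hmax]
    have hlt : (1 : Int) < maxc + 1 := by omega
    rw [PySem.List.pyRange_one_cons hlt]
    obtain ⟨m, hm⟩ : ∃ m, PySem.List.min? (1 :: PySem.List.pyRange (1 + 1) (maxc + 1) 1)
        (pvKeyB tb C) = some m := by
      rcases hmm : PySem.List.min? (1 :: PySem.List.pyRange (1 + 1) (maxc + 1) 1) (pvKeyB tb C) with _ | m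
      · exact absurd ((PySem.List.min?_eq_none_iff _ _).1 hmm) (by simp)
      · exact ⟨m, rfl⟩
    have hm' : (PySem.List.pyRange (1 + 1) (maxc + 1) 1).foldl
        (pvMStep (pvKeyB tb C)) (some 1) = some m := by
      rw [pvMin?_eq, List.foldl_cons] at hm
      rwa [show pvMStep (pvKeyB tb C) none 1 = some 1 from rfl] at hm
    rw [hm]
    simp only [List.foldl_cons, pvStepA_eq]
    rw [pvMinAux (pvKeyB tb C) (PySem.List.pyRange (1 + 1) (maxc + 1) 1) 1 m hm']
    rfl
  · have hA : PySem.List.pyRange 1 (maxc + 1) 1 = [] := by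
      have : ¬ ((1:Int) < maxc + 1) := by omega
      simp [PySem.List.pyRange, this]
    have hmax : max maxc 1 = 1 := by omega
    rw [hA, hmax]
    rw [show PySem.List.pyRange 1 (1 + 1) 1 = [1] from by decide]
    rw [show PySem.List.min? [(1:Int)] (pvKeyB tb C) = some 1 from by rw [pvMin?_eq]; rfl]
    rfl

lemma pvBestB_pos (tb : Int) (C : List Int) (maxc : Int) :
    1 ≤ (PySem.List.min? (PySem.List.pyRange 1 (max maxc 1 + 1) 1) (pvKeyB tb C)).getD 1 := by
  rcases h : PySem.List.min? (PySem.List.pyRange 1 (max maxc 1 + 1) 1) (pvKeyB tb C) with _ | m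
  · simp
  · have hmem := PySem.List.min?_mem h
    rw [PySem.List.mem_pyRange_one] at hmem
    simpa using hmem.1

-- A's inner 'for i, cid in enumerate(client_ids)' with C[i] lookup, as a fold over the ids
lemma pvEnumFold (h : PySem.Dict Int Int → Int → Int → PySem.Dict Int Int) (g : Int → Int) :
    ∀ (ids : List Int) (pre : List Int) (bs : PySem.Dict Int Int),
    (PySem.List.enumerate ids ((pre.length : Nat) : Int)).foldl
        (fun bs icid => h bs icid.2 (PySem.List.pyGetD (pre ++ ids.map g) icid.1 0)) bs
      = ids.foldl (fun bs cid => h bs cid (g cid)) bs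
  | [], pre, bs => by simp [PySem.List.enumerate]
  | x :: t, pre, bs => by
    have hcons : PySem.List.enumerate (x :: t) ((pre.length : Nat) : Int)
        = (((pre.length : Nat) : Int), x) :: PySem.List.enumerate t (((pre.length : Nat) : Int) + 1) := by
      simp [PySem.List.enumerate]
    rw [hcons]
    simp only [List.foldl_cons]
    have hget : PySem.List.pyGetD (pre ++ (x :: t).map g) ((pre.length : Nat) : Int) 0 = g x := by
      simp [PySem.List.pyGetD]
    rw [hget]
    have hlen : ((pre.length : Nat) : Int) + 1 = (((pre ++ [g x]).length : Nat) : Int) := by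
      simp [List.length_append]
    have happ : pre ++ (x :: t).map g = (pre ++ [g x]) ++ t.map g := by simp
    rw [hlen, happ]
    exact pvEnumFold h g t (pre ++ [g x]) (h bs x (g x))

lemma pvRowA_eq (ids : List Int) (g : Int → Int) (bk it : Int) :
    pvRowA ids (ids.map g) bk it
      = ids.foldl (fun bs cid =>
          bs.insert cid (max 0 (min (pvCeilDiv (g cid) bk) (g cid - it * pvCeilDiv (g cid) bk))))
          PySem.Dict.empty := by
  have := pvEnumFold
    (fun bs cid c => bs.insert cid (max 0 (min (pvCeilDiv c bk) (c - it * pvCeilDiv c bk))))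
    g ids [] PySem.Dict.empty
  simpa [pvRowA] using this

lemma pvZipSelf {α β : Type} (l : List α) (w : α → β) :
    l.zip (l.map w) = l.map (fun a => (a, w a)) := by
  induction l with
  | nil => rfl
  | cons x t ih => simp [ih]

-- one pass of B's inner loop over (cid, per, remaining), with the remaining-vector invariant
lemma pvInnerFold (g : Int → Int) (k t : Int) (hk : 1 ≤ k) :
    ∀ (ids : List Int) (bs : PySem.Dict Int Int) (nr : List Int),
    ((ids.map (fun a => (a, -(PySem.Int.floordiv (-(g a)) k), pvRemF k t (g a)))).foldl
        pvInnerB (bs, nr))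
      = (ids.foldl (fun bs cid =>
            bs.insert cid (max 0 (min (pvCeilDiv (g cid) k) (g cid - t * pvCeilDiv (g cid) k)))) bs,
         nr ++ ids.map (fun cid => pvRemF k (t + 1) (g cid)))
  | [], bs, nr => by simp
  | x :: ids, bs, nr => by
    simp only [List.map_cons, List.foldl_cons]
    have h1 := (pvEntry_step k (g x) t hk).1
    have h2 := (pvEntry_step k (g x) t hk).2
    rw [show pvInnerB (bs, nr) (x, -(PySem.Int.floordiv (-(g x)) k), pvRemF k t (g x))
        = (bs.insert x (max 0 (min (pvCeilDiv (g x) k) (pvRemF k t (g x)))),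
           nr ++ [pvRemF k t (g x) - max 0 (min (pvCeilDiv (g x) k) (pvRemF k t (g x)))]) from rfl]
    rw [h2, h1]
    rw [pvInnerFold g k t hk ids _ _]
    simp

lemma pvInner_eq (ids : List Int) (g : Int → Int) (k t : Int) (hk : 1 ≤ k) :
    ((ids.zip (((ids.map g).map (fun c => -(PySem.Int.floordiv (-c) k))).zip
        (ids.map (fun cid => pvRemF k t (g cid))))).foldl pvInnerB (PySem.Dict.empty, []))
      = (ids.foldl (fun bs cid =>
            bs.insert cid (max 0 (min (pvCeilDiv (g cid) k) (g cid - t * pvCeilDiv (g cid) k))))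
            PySem.Dict.empty,
         ids.map (fun cid => pvRemF k (t + 1) (g cid))) := by
  rw [List.map_map, List.zip_map', pvZipSelf]
  have := pvInnerFold g k t hk ids PySem.Dict.empty []
  simpa [Function.comp] using this

lemma pvOuter (ids : List Int) (g : Int → Int) (k : Int) (hk : 1 ≤ k) :
    ∀ (n : Nat),
    ((List.range n).foldl
        (fun (st : List (List (Int × Int)) × List Int) _ =>
          let rowrem := (ids.zip (((ids.map g).map (fun c => -(PySem.Int.floordiv (-c) k))).zip st.2)).foldl
            pvInnerB (PySem.Dict.empty, [])
          (st.1 ++ [rowrem.1.items], rowrem.2))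
        ([], ids.map g))
      = ((List.range n).foldl
          (fun acc i => acc ++ [(pvRowA ids (ids.map g) k ((i : Nat) : Int)).items]) [],
         ids.map (fun cid => pvRemF k ((n : Nat) : Int) (g cid))) := by
  intro n
  induction n with
  | zero => simp [pvRemF_zero]
  | succ n ih =>
    rw [List.range_succ, List.foldl_append, List.foldl_append, ih]
    simp only [List.foldl_cons, List.foldl_nil]
    rw [pvInner_eq ids g k ((n : Nat) : Int) hk]
    rw [← pvRowA_eq ids g k ((n : Nat) : Int)]
    have hc : (((n + 1 : Nat) : Nat) : Int) = ((n : Nat) : Int) + 1 := by push_cast; ring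
    rw [hc]

lemma pvSched_eq (ids : List Int) (g : Int → Int) (K : Int) (hK : 1 ≤ K) :
    (PySem.List.pyRange 0 K 1).foldl
        (fun acc it => acc ++ [(pvRowA ids (ids.map g) K it).items]) []
      = ((PySem.List.pyRange 0 K 1).foldl
          (fun (st : List (List (Int × Int)) × List Int) _ =>
            let rowrem := (ids.zip (((ids.map g).map (fun c => -(PySem.Int.floordiv (-c) K))).zip st.2)).foldl
              pvInnerB (PySem.Dict.empty, [])
            (st.1 ++ [rowrem.1.items], rowrem.2))
          ([], ids.map g)).1 := by
  have hKn : K = ((K.toNat : Nat) : Int) := by omega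
  rw [hKn, PySem.List.pyRange_zero_natCast, List.foldl_map, List.foldl_map]
  rw [pvOuter ids g ((K.toNat : Nat) : Int) (by omega) K.toNat]

-- ===== VERDICT (by name: the statement is the Claim_ definition above) =====
theorem create_schedule_spec : Claim_equal_create_schedule := by
  intro tb cds _
  show create_schedule tb cds = create_schedule_alt tb cds
  unfold create_schedule create_schedule_alt
  dsimp only
  split_ifs with h
  · rfl
  · rw [pvBest_eq]
    exact congrArg _ (pvSched_eq _ _ _ (pvBestB_pos _ _ _))
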